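-- pv_equiv track=rewrite | github.com/LY4C49/ECE-143 | threshold_values.py | threshold_values
-- ===== SOURCE A (Python) =====
-- def map_bitstring(x: list) -> dict:
--     """_summary_
--
--     Args:
--         x (list): _description_
--
--     Returns:
--         dict: _description_
--     """
--     assert isinstance(x, list)
--     result = {}
--
--     for s in x:
--         assert isinstance(s, str)
--         if s in result:
--             continue
--         len_s = len(s)
--         num_0 = 0
--         for bit in s:
--             assert (bit == "0" or bit == "1")
--             if bit == "0":
--                 num_0 += 1
--         if num_0 > int(len_s/2):
--             result[s] = 0
--         else:
--             result[s] = 1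
--
--     return result
--
-- def gather_values(x: list) -> dict:
--     """_summary_
--
--     Args:
--         x (list): _description_
--
--     Returns:
--         dict: _description_
--     """
--     assert isinstance(x, list)
--     refer = map_bitstring(x)
--     result_map = {}
--     for s in x:
--         if s not in result_map:
--             result_map[s] = [refer[s]]
--         else:
--             result_map[s].append(refer[s])
--     return result_map
--
-- def threshold_values(seq, threshold=1):
--     """_summary_
--
--     Args:
--         seq (_type_): _description_
--         threshold (int, optional): _description_. Defaults to 1.
--     """
--     assert isinstance(seq, list)
--     assert isinstance(threshold, int) and threshold >= 0
--     gathered = gather_values(seq)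
--     freq = {}
--
--     for key, value in gathered.items():
--         freq[key] = len(value)
--
--     # if there is a tie, smaller key will have higher priority!
--     # python sort list from small to big, so use negative value to sort.
--     # Bigger positive value will have smaller reversed value
--     result_list = sorted(freq.items(), key=lambda t: (-t[1], int(t[0], 2)))
--
--     result = {}
--     for i, element in enumerate(result_list):
--         if i+1 <= threshold:
--             result[element[0]] = 1
--         else:
--             result[element[0]] = 0
--
--     return result
-- ===== SOURCE B (Python) =====
-- def threshold_values(seq, threshold=1):
--     """Count each bitstring's frequency, rank by (frequency desc, numeric value asc),
--     and mark the top `threshold` keys with 1, the rest with 0."""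
--     assert isinstance(seq, list)
--     assert isinstance(threshold, int) and threshold >= 0
--     counts = {}
--     for s in seq:
--         counts[s] = counts.get(s, 0) + 1
--     order = sorted(counts.items(), key=lambda t: (-t[1], int(t[0], 2)))
--     top = {k for k, _ in order[:threshold]}
--     return {k: (1 if k in top else 0) for k, _ in order}
-- ===== Notes on version B (the rewrite author's own statement) =====
-- stated objective: simpler
-- what changed: B replaces A's three-helper pipeline (majority-vote map_bitstring, gather_values building per-key lists, then taking their lengths) with one direct frequency-count loop, and marks the top-threshold keys by membership in a set of the sorted prefix instead of A's enumerated-rank dict rebuild.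
import Mathlib
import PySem

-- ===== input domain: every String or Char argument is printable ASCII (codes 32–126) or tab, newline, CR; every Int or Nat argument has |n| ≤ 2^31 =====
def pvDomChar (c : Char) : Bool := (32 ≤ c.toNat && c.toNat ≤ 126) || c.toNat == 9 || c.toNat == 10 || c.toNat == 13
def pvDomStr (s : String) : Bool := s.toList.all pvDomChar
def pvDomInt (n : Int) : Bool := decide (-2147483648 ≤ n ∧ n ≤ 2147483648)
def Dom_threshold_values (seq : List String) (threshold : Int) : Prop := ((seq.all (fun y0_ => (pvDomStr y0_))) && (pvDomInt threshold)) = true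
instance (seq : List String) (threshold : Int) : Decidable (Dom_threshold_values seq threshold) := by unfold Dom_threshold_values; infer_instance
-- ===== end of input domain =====

-- B replaces A's three-helper pipeline (majority map, gathered value lists, lengths) by one direct
-- frequency count, then marks the top-threshold keys by membership in a set of the sorted prefix
-- instead of by enumerated rank (objective: simpler).

-- ===== PORT A =====
-- helper map_bitstring; int(len_s/2) is exact truncating division here (lengths < 2^53)
def pvMapBitstring (x : List String) : PySem.Dict String Int :=
  x.foldl (fun result s =>
    if result.contains s then result
    else
      let len_s : Int := PySem.Str.len s
      let num_0 : Int := s.toList.foldl (fun n bit => if bit == '0' then n + 1 else n) 0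
      if num_0 > PySem.Int.truncdiv len_s 2 then result.insert s 0 else result.insert s 1)
    PySem.Dict.empty

-- helper gather_values; refer[s] can never raise KeyError (refer was built from the same list), so getD is exact
def pvGatherValues (x : List String) : PySem.Dict String (List Int) :=
  let refer := pvMapBitstring x
  x.foldl (fun m s =>
    if m.contains s = false then m.insert s [refer.getD s 0]
    else m.modify s [] (fun v => v ++ [refer.getD s 0]))
    PySem.Dict.empty

def threshold_values (seq : List String) (threshold : Int) : List (String × Int) :=
  let gathered := pvGatherValues seq
  let freq := gathered.items.foldl (fun f kv => f.insert kv.1 ((kv.2.length : Int))) PySem.Dict.empty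
  -- int(t[0], 2): Pre_ excludes the ValueError (empty string) case, so getD 0 is never hit on a parse failure
  let result_list := PySem.List.sorted2 freq.items (fun t => -t.2) (fun t => (PySem.Int.ofStrBase? t.1 2).getD 0)
  ((PySem.List.enumerate result_list).foldl
    (fun r ie => r.insert ie.2.1 (if ie.1 + 1 ≤ threshold then (1 : Int) else 0))
    PySem.Dict.empty).items

-- ===== PORT B =====
def threshold_values_alt (seq : List String) (threshold : Int) : List (String × Int) :=
  let counts := seq.foldl (fun d s => d.insert s (d.getD s 0 + 1)) PySem.Dict.empty
  let order := PySem.List.sorted2 counts.items (fun t => -t.2) (fun t => (PySem.Int.ofStrBase? t.1 2).getD 0)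
  let top : PySem.Set String :=
    PySem.Set.ofList ((PySem.List.slice order none (some threshold)).map (fun kv => kv.1))
  (order.foldl (fun r kv => r.insert kv.1 (if top.contains kv.1 then (1 : Int) else 0)) PySem.Dict.empty).items

-- ===== PRECONDITION & SPEC =====
-- Pre_ excludes exactly the inputs where A raises: AssertionError (threshold < 0 or a character
-- other than '0'/'1') and ValueError (int('', 2) on an empty string).
def Pre_threshold_values (seq : List String) (threshold : Int) : Prop :=
  0 ≤ threshold ∧ ∀ s ∈ seq, s.toList ≠ [] ∧ (s.toList.all fun c => c == '0' || c == '1') = true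
instance (seq : List String) (threshold : Int) : Decidable (Pre_threshold_values seq threshold) := by
  unfold Pre_threshold_values; infer_instance

def pvWitness_threshold_values : List String × Int := (["01", "10", "01", "111"], 2)

def Spec_threshold_values (seq : List String) (threshold : Int) (out : List (String × Int)) : Prop := out = threshold_values_alt seq threshold
instance (seq : List String) (threshold : Int) (out : List (String × Int)) : Decidable (Spec_threshold_values seq threshold out) := by unfold Spec_threshold_values; infer_instance

-- ===== CLAIM (what is proved, stated in full; the proofs are below) =====
def Claim_equal_threshold_values : Prop := ∀ (seq : List String) (threshold : Int), Dom_threshold_values seq threshold → Pre_threshold_values seq threshold → Spec_threshold_values seq threshold (threshold_values seq threshold)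

-- ===== LEMMAS AND PROOFS =====

-- getD of A's gather loop: the values list collected at key k is g mapped over k's occurrences.
theorem pvGather_getD (x : List String) (g : String → Int) (d : PySem.Dict String (List Int)) (k : String) :
    (x.foldl (fun m s =>
      if m.contains s = false then m.insert s [g s]
      else m.modify s [] (fun v => v ++ [g s])) d).getD k []
    = d.getD k [] ++ (x.filter (fun s => s == k)).map g := by
  induction x generalizing d with
  | nil => simp
  | cons s t ih =>
    simp only [List.foldl_cons, List.filter_cons]
    rw [ih]
    by_cases hk : s = k
    · subst hk
      by_cases hc : d.contains s = false
      · simp [hc, PySem.Dict.getD_of_not_contains _ _ hc]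
      · simp [hc]
    · have hk' : ¬ k = s := fun h => hk h.symm
      by_cases hc : d.contains s = false
      · simp [hc, PySem.Dict.getD_insert, hk, hk']
      · simp [hc, PySem.Dict.getD_modify, hk, hk']

-- keys of A's gather loop: first-seen distinct strings.
theorem pvGather_keys (x : List String) (g : String → Int) (d : PySem.Dict String (List Int)) :
    (x.foldl (fun m s =>
      if m.contains s = false then m.insert s [g s]
      else m.modify s [] (fun v => v ++ [g s])) d).keys
    = PySem.Set.update d.keys x := by
  induction x generalizing d with
  | nil => simp [PySem.Set.update]
  | cons s t ih =>
    simp only [List.foldl_cons]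
    rw [ih]
    have hstep : (if d.contains s = false then d.insert s [g s]
        else d.modify s [] (fun v => v ++ [g s])).keys = PySem.Set.add d.keys s := by
      by_cases hc : d.contains s = false
      · rw [if_pos hc, PySem.Dict.keys_insert_of_not_contains d _ hc]
        have hmem : s ∉ d.keys := fun h => by
          simp [(PySem.Dict.contains_iff_mem_keys d s).mpr h] at hc
        simp [PySem.Set.add, hmem]
      · rw [if_neg hc]
        have hc' : d.contains s = true := by
          cases h : d.contains s with
          | false => exact absurd h hc
          | true => rfl
        have hmem : s ∈ d.keys := (PySem.Dict.contains_iff_mem_keys d s).mp hc'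
        rw [PySem.Dict.keys_modify, PySem.Dict.keys_insert_of_contains _ _ hc']
        simp [PySem.Set.add, hmem]
    rw [hstep]
    rfl

theorem pvGatherValues_eq (x : List String) :
    pvGatherValues x
    = x.foldl (fun m s =>
        if m.contains s = false then m.insert s [(pvMapBitstring x).getD s 0]
        else m.modify s [] (fun v => v ++ [(pvMapBitstring x).getD s 0])) PySem.Dict.empty := rfl

theorem pvGathered_keys (seq : List String) :
    (pvGatherValues seq).keys = PySem.Set.ofList seq := by
  rw [pvGatherValues_eq,
    pvGather_keys seq (fun s => (pvMapBitstring seq).getD s 0) PySem.Dict.empty]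
  rfl

theorem pvGathered_items (seq : List String) :
    (pvGatherValues seq).items
    = (PySem.Set.ofList seq).map
        (fun k => (k, ((seq.filter (fun s => s == k)).map
            (fun s => (pvMapBitstring seq).getD s 0)))) := by
  have hnd : (pvGatherValues seq).keys.Nodup := by
    rw [pvGathered_keys]; exact PySem.Set.nodup_ofList seq
  rw [PySem.Dict.items_eq_map_keys _ hnd [], pvGathered_keys]
  refine List.map_congr_left (fun k _hk => ?_)
  rw [pvGatherValues_eq,
    pvGather_getD seq (fun s => (pvMapBitstring seq).getD s 0) PySem.Dict.empty k]
  simp [PySem.Dict.getD_empty]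

theorem pvFreq_items (seq : List String) :
    ((pvGatherValues seq).items.foldl
        (fun f kv => f.insert kv.1 ((kv.2.length : Int))) PySem.Dict.empty).items
    = (PySem.Set.ofList seq).map (fun k => (k, (seq.count k : Int))) := by
  have hnd : ((pvGatherValues seq).items.map Prod.fst).Nodup := by
    have h1 : (pvGatherValues seq).items.map Prod.fst = (pvGatherValues seq).keys := rfl
    rw [h1, pvGathered_keys]; exact PySem.Set.nodup_ofList seq
  have h := PySem.Dict.items_foldl_insert_fresh (pvGatherValues seq).items Prod.fst
      (fun kv => ((kv.2.length : Int))) PySem.Dict.empty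
      (fun a _ => PySem.Dict.contains_empty a.1) hnd
  have hemp : (PySem.Dict.empty : PySem.Dict String Int).items = [] := rfl
  rw [h, hemp, List.nil_append, pvGathered_items, List.map_map]
  refine List.map_congr_left (fun k _hk => ?_)
  simp only [Function.comp]
  have : ((seq.filter (fun s => s == k)).map
      (fun s => (pvMapBitstring seq).getD s 0)).length = seq.count k := by
    rw [List.length_map, ← List.countP_eq_length_filter]
    rfl
  rw [this]

theorem pvCounts_items (seq : List String) :
    (seq.foldl (fun d s => d.insert s (d.getD s 0 + 1)) PySem.Dict.empty).items
    = (PySem.Set.ofList seq).map (fun k => (k, (seq.count k : Int))) := by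
  rw [PySem.Dict.foldl_insert_getD_add_one_eq_counter, PySem.Dict.items_counter]

-- the two marking loops agree on any pair list with distinct keys, for threshold ≥ 0
theorem pvFinal (L : List (String × Int)) (threshold : Int)
    (hnd : (L.map Prod.fst).Nodup) (ht : 0 ≤ threshold) :
    ((PySem.List.enumerate L).foldl
        (fun r ie => r.insert ie.2.1 (if ie.1 + 1 ≤ threshold then (1 : Int) else 0))
        PySem.Dict.empty).items
    = (L.foldl (fun r kv => r.insert kv.1
          (if (PySem.Set.ofList ((PySem.List.slice L none (some threshold)).map (fun kv => kv.1))).contains kv.1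
           then (1 : Int) else 0)) PySem.Dict.empty).items := by
  have hnd' : (L.map (fun kv : String × Int => kv.1)).Nodup := hnd
  have hmapA : (PySem.List.enumerate L 0).map (fun ie => ie.2.1) = L.map (fun kv => kv.1) := by
    calc (PySem.List.enumerate L 0).map (fun ie => ie.2.1)
        = ((PySem.List.enumerate L 0).map (fun ie => ie.2)).map (fun kv => kv.1) := by
          rw [List.map_map]; rfl
      _ = L.map (fun kv => kv.1) := by rw [PySem.List.map_snd_enumerate]
  have hA := PySem.Dict.items_foldl_insert_fresh (PySem.List.enumerate L)
      (fun ie => ie.2.1) (fun ie => if ie.1 + 1 ≤ threshold then (1 : Int) else 0)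
      PySem.Dict.empty (fun a _ => PySem.Dict.contains_empty _) (by rw [hmapA]; exact hnd')
  have hB := PySem.Dict.items_foldl_insert_fresh L (fun kv => kv.1)
      (fun kv => if (PySem.Set.ofList ((PySem.List.slice L none (some threshold)).map (fun kv => kv.1))).contains kv.1
           then (1 : Int) else 0)
      PySem.Dict.empty (fun a _ => PySem.Dict.contains_empty _) hnd'
  refine hA.trans (Eq.trans ?_ hB.symm)
  have hemp : (PySem.Dict.empty : PySem.Dict String Int).items = [] := rfl
  rw [hemp, List.nil_append, List.nil_append]
  apply List.ext_getElem
  · simp [PySem.List.length_enumerate]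
  · intro i h1 h2
    have hi : i < L.length := by simpa using h2
    simp only [List.getElem_map, PySem.List.getElem_enumerate, zero_add]
    have hmem :
        ((PySem.Set.ofList ((PySem.List.slice L none (some threshold)).map (fun kv => kv.1))).contains L[i].1 = true)
        ↔ ((i : Int) + 1 ≤ threshold) := by
      rw [PySem.Set.contains_iff, PySem.Set.mem_ofList, PySem.List.slice_to L ht, List.map_take]
      constructor
      · intro hmemtake
        obtain ⟨j, hj, hje⟩ := List.getElem_of_mem hmemtake
        have hjt : j < threshold.toNat := by
          simp only [List.length_take] at hj; omega
        have hjlen : j < (L.map (fun kv : String × Int => kv.1)).length := by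
          simp only [List.length_take, List.length_map] at hj ⊢; omega
        have hje' : (L.map (fun kv : String × Int => kv.1))[j]'hjlen = L[i].1 := by
          rw [← hje]; rw [List.getElem_take]
        have hil : i < (L.map (fun kv : String × Int => kv.1)).length := by
          simp only [List.length_map]; exact hi
        have hii : (L.map (fun kv : String × Int => kv.1))[i]'hil = L[i].1 := by
          simp
        have hjieq : (L.map (fun kv : String × Int => kv.1))[j]'hjlen
            = (L.map (fun kv : String × Int => kv.1))[i]'hil := by
          rw [hje', hii]
        have : j = i := (List.Nodup.getElem_inj_iff hnd').mp hjieq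
        omega
      · intro hle
        have hit : i < threshold.toNat := by omega
        have hlen : i < (List.take threshold.toNat (L.map (fun kv : String × Int => kv.1))).length := by
          simp only [List.length_take, List.length_map]; omega
        have hgt : L[i].1 = (List.take threshold.toNat (L.map (fun kv : String × Int => kv.1)))[i]'hlen := by
          rw [List.getElem_take]; simp
        rw [hgt]; exact List.getElem_mem _
    by_cases hcond : (i : Int) + 1 ≤ threshold
    · rw [if_pos hcond, if_pos (hmem.mpr hcond)]
    · have hnc : ¬ ((PySem.Set.ofList ((PySem.List.slice L none (some threshold)).map (fun kv => kv.1))).contains L[i].1 = true) :=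
        fun h => hcond (hmem.mp h)
      rw [if_neg hcond, if_neg hnc]

-- ===== VERDICT (by name: the statement is the Claim_ definition above) =====
theorem threshold_values_spec : Claim_equal_threshold_values := by
  intro seq threshold _hdom hpre
  obtain ⟨ht, _⟩ := hpre
  simp only [Spec_threshold_values, threshold_values, threshold_values_alt]
  rw [pvFreq_items seq, pvCounts_items seq]
  apply pvFinal
  · have h1 : (((PySem.Set.ofList seq).map (fun k => (k, (seq.count k : Int)))).map Prod.fst).Nodup := by
      have : ((PySem.Set.ofList seq).map (fun k => (k, (seq.count k : Int)))).map Prod.fst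
          = PySem.Set.ofList seq := by
        rw [List.map_map]; simp [Function.comp_def]
      rw [this]; exact PySem.Set.nodup_ofList seq
    have hperm := PySem.List.sorted2_perm ((PySem.Set.ofList seq).map (fun k => (k, (seq.count k : Int))))
        (fun t => -t.2) (fun t => (PySem.Int.ofStrBase? t.1 2).getD 0) false
    exact ((hperm.map Prod.fst).nodup_iff).mpr h1
  · exact ht
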